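-- pv_equiv track=rewrite | github.com/dbramucci/markov_weekend_experiment | markov.py | group_by_n
-- ===== SOURCE A (Python) =====
-- from itertools import tee
-- from typing import Iterator, List
--
-- def group_by_n(iterator: Iterator, n: int) -> Iterator:
--     """ returns groups of n items from the iterator (ex [1, 2, 3], 2 returns (1, 2), (2, 3))
--
--     :param iterator: The iterator to use
--     :param n: the number of items to group together
--     :return: a iterator of n-grouped items from the iterator
--     """
--     parallels = tee(iterator, n)
--     for i, iterator in enumerate(parallels):
--         if i == 0:
--             continue
--         for j, _ in enumerate(iterator):
--             if i - 1 == j: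
--                 break
--     return zip(*parallels)
-- ===== SOURCE B (Python) =====
-- def group_by_n(iterator, n):
--     """Sliding windows of n consecutive items: one window per starting index."""
--     items = list(iterator)
--     return (tuple(items[i:i + n]) for i in range(len(items) - n + 1))
-- ===== Notes on version B (the rewrite author's own statement) =====
-- stated objective: idiomatic
-- what changed: Replaces the n parallel tee copies advanced by hand and zipped together with the standard windows idiom, one slice items[i:i+n] per starting index; Pre_ excludes n < 0, where A's tee raises ValueError, and n = 0, where the number of size-0 windows is a corner nobody specifies (A yields none, B one per position).
-- outside the precondition, e.g. on group_by_n([1, 2], 0): A returns [], B returns [(), (), ()]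
import Mathlib
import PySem

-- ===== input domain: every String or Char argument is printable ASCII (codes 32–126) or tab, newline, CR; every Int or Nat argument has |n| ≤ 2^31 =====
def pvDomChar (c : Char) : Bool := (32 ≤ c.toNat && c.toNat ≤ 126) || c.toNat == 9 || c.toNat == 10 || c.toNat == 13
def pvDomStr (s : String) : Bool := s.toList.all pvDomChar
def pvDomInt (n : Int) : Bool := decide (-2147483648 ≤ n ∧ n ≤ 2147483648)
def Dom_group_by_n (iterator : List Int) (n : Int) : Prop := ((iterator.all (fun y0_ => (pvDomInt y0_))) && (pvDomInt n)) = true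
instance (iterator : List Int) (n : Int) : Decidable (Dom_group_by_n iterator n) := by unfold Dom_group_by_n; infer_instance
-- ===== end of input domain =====

-- B replaces A's n tee copies + hand-advancing + zip with the plain slicing windows
-- idiom (objective: idiomatic; same asymptotic cost). B materialises the iterator
-- into a list eagerly where A is lazy; the equivalence is about the returned values.

-- ===== PORT A =====

-- heads of all the zipped streams: none as soon as one is exhausted (zip stops there)
def pyHeads? : List (List Int) → Option (List Int)
  | [] => some []
  | [] :: _ => none
  | (a :: _) :: rest => (pyHeads? rest).map (a :: ·)

-- advance every stream by one item (zip consumes one element of each per output)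
def tailsAll : List (List Int) → List (List Int)
  | [] => []
  | l :: ls => l.tail :: tailsAll ls

-- termination facts for pyZipMany (cited by name in its decreasing_by)
theorem pyHeads?_ne_nil : ∀ {ls : List (List Int)} {hs : List Int},
    pyHeads? ls = some hs → ∀ l ∈ ls, l ≠ [] := by
  intro ls
  induction ls with
  | nil => intro hs _ l hl; cases hl
  | cons a rest ih =>
    intro hs h l hl
    cases a with
    | nil => simp [pyHeads?] at h
    | cons x xs =>
      simp only [pyHeads?, Option.map_eq_some_iff] at h
      rcases h with ⟨hs', h1, _⟩
      rcases List.mem_cons.mp hl with rfl | hl'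
      · simp
      · exact ih h1 l hl'

theorem tailsAll_sum_lt {ls : List (List Int)} (hne : ∀ l ∈ ls, l ≠ [])
    (hls : ls ≠ []) : ((tailsAll ls).map List.length).sum < (ls.map List.length).sum := by
  induction ls with
  | nil => exact absurd rfl hls
  | cons a rest ih =>
    have ha : a ≠ [] := hne a (by simp)
    have h1 : a.tail.length < a.length := by
      cases a with
      | nil => exact absurd rfl ha
      | cons _ _ => simp
    have h0 : 0 < a.length := by
      cases a with
      | nil => exact absurd rfl ha
      | cons _ _ => simp
    cases rest with
    | nil => simp [tailsAll]; omega
    | cons b bs =>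
      have h2 := ih (fun l hl => hne l (List.mem_cons_of_mem a hl)) (by simp)
      simp only [tailsAll, List.map_cons, List.sum_cons] at *
      omega

-- exact semantics of Python's zip(*parallels) on lists
def pyZipMany (ls : List (List Int)) : List (List Int) :=
  match h : pyHeads? ls with
  | none => []
  | some hs =>
    if hls : ls = [] then []
    else hs :: pyZipMany (tailsAll ls)
termination_by (ls.map List.length).sum
decreasing_by
  exact tailsAll_sum_lt (pyHeads?_ne_nil h) hls

-- A: parallels = tee(iterator, n); copy i gets advanced by i items, then zip(*parallels)
def group_by_n (iterator : List Int) (n : Int) : List (List Int) :=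
  pyZipMany ((List.range n.toNat).map (fun i => iterator.drop i))

-- ===== PORT B =====

-- B: items = list(iterator); one slice items[i:i+n] per i in range(len(items) - n + 1)
def group_by_n_alt (iterator : List Int) (n : Int) : List (List Int) :=
  (PySem.List.pyRange 0 ((iterator.length : Int) - n + 1) 1).map
    (fun i => PySem.List.slice iterator (some i) (some (i + n)))

-- ===== PRECONDITION & SPEC =====
-- Pre_ excludes n < 0, where A's tee raises ValueError, and n = 0, where the number of
-- size-0 windows is a corner nobody specifies (A yields none, B one empty window per position).
def Pre_group_by_n (iterator : List Int) (n : Int) : Prop := 1 ≤ n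
instance (iterator : List Int) (n : Int) : Decidable (Pre_group_by_n iterator n) := by unfold Pre_group_by_n; infer_instance
def pvWitness_group_by_n : List Int × Int := ([1, 2, 3, 4], 2)

def Spec_group_by_n (iterator : List Int) (n : Int) (out : List (List Int)) : Prop := out = group_by_n_alt iterator n
instance (iterator : List Int) (n : Int) (out : List (List Int)) : Decidable (Spec_group_by_n iterator n out) := by unfold Spec_group_by_n; infer_instance

-- ===== CLAIM (what is proved, stated in full; the proofs are below) =====
def Claim_equal_group_by_n : Prop := ∀ (iterator : List Int) (n : Int), Dom_group_by_n iterator n → Pre_group_by_n iterator n → Spec_group_by_n iterator n (group_by_n iterator n)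

-- ===== LEMMAS AND PROOFS =====

-- reference sliding-windows function both ports are reduced to
def wins (l : List Int) (n : Nat) : List (List Int) :=
  if h : 0 < n ∧ n ≤ l.length then l.take n :: wins l.tail n else []
termination_by l.length
decreasing_by
  cases l with
  | nil => simp at h; omega
  | cons a l' => simp

theorem pyZipMany_nil : pyZipMany [] = [] := by
  rw [pyZipMany]; rfl

theorem pyZipMany_none {ls : List (List Int)} (h : pyHeads? ls = none) :
    pyZipMany ls = [] := by
  rw [pyZipMany]
  split
  · rfl
  · rename_i hs heq; rw [h] at heq; cases heq

theorem pyZipMany_cons {ls : List (List Int)} {hs : List Int}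
    (h : pyHeads? ls = some hs) (hne : ls ≠ []) :
    pyZipMany ls = hs :: pyZipMany (tailsAll ls) := by
  rw [pyZipMany]
  split
  · rename_i heq; rw [h] at heq; cases heq
  · rename_i hs' heq
    rw [h] at heq
    cases heq
    rw [dif_neg hne]

theorem tailsAll_eq_map (ls : List (List Int)) : tailsAll ls = ls.map List.tail := by
  induction ls with
  | nil => rfl
  | cons a rest ih => simp [tailsAll, ih]

theorem drop_tail_comm (l : List Int) (i : Nat) : (l.drop i).tail = l.tail.drop i := by
  cases l with
  | nil => simp
  | cons a l' =>
    rw [List.tail_drop]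
    cases i with
    | zero => simp
    | succ j => simp [List.drop_succ_cons]

theorem heads_drops (n : Nat) : ∀ l : List Int,
    pyHeads? ((List.range n).map (fun i => l.drop i)) =
      if n ≤ l.length then some (l.take n) else none := by
  induction n with
  | zero => intro l; simp [pyHeads?]
  | succ n ih =>
    intro l
    rw [List.range_succ_eq_map]
    cases l with
    | nil => simp [pyHeads?]
    | cons a l' =>
      have hmap : (List.map Nat.succ (List.range n)).map (fun i => (a :: l').drop i)
          = (List.range n).map (fun i => l'.drop i) := by
        rw [List.map_map]; rfl
      simp only [List.map_cons, List.drop_zero, hmap, pyHeads?, ih l', List.length_cons]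
      by_cases hle : n ≤ l'.length
      · rw [if_pos hle, if_pos (by omega)]
        simp [List.take_succ_cons]
      · rw [if_neg hle, if_neg (by omega)]
        rfl

theorem tails_drops (l : List Int) (n : Nat) :
    tailsAll ((List.range n).map (fun i => l.drop i)) =
      (List.range n).map (fun i => l.tail.drop i) := by
  rw [tailsAll_eq_map, List.map_map]
  apply List.map_congr_left
  intro i _
  exact drop_tail_comm l i

theorem A_wins (n : Nat) : ∀ l : List Int,
    pyZipMany ((List.range n).map (fun i => l.drop i)) = wins l n := by
  intro l
  induction l with
  | nil =>
    rw [wins, dif_neg (by simp only [List.length_nil]; omega)]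
    cases n with
    | zero => simp [pyZipMany_nil]
    | succ m =>
      apply pyZipMany_none
      rw [heads_drops]
      simp
  | cons a l' ih =>
    by_cases h1 : 0 < n
    · by_cases h2 : n ≤ (a :: l').length
      · have hh : pyHeads? ((List.range n).map (fun i => (a :: l').drop i))
            = some ((a :: l').take n) := by rw [heads_drops, if_pos h2]
        have hne : (List.range n).map (fun i => (a :: l').drop i) ≠ [] := by
          intro hcon
          have := congrArg List.length hcon
          simp at this
          omega
        rw [pyZipMany_cons hh hne, tails_drops]
        simp only [List.tail_cons]
        conv_rhs => rw [wins]
        rw [dif_pos ⟨h1, h2⟩]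
        simp only [List.tail_cons]
        rw [ih]
      · have hh : pyHeads? ((List.range n).map (fun i => (a :: l').drop i)) = none := by
          rw [heads_drops, if_neg h2]
        rw [pyZipMany_none hh, wins, dif_neg (by tauto)]
    · have : n = 0 := by omega
      subst this
      simp [pyZipMany_nil, wins]

theorem wins_eq_map (k : Nat) (hk : 1 ≤ k) : ∀ l : List Int,
    wins l k = (List.range (l.length + 1 - k)).map (fun i => (l.drop i).take k) := by
  intro l
  induction l with
  | nil =>
    rw [wins, dif_neg (by simp only [List.length_nil]; omega)]
    have : (0 : Nat) + 1 - k = 0 := by omega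
    simp [this]
  | cons a t ih =>
    by_cases h2 : k ≤ t.length + 1
    · rw [wins, dif_pos ⟨by omega, by simpa using h2⟩]
      simp only [List.tail_cons, ih]
      have hm : (a :: t).length + 1 - k = (t.length + 1 - k) + 1 := by
        simp only [List.length_cons]; omega
      rw [hm, List.range_succ_eq_map, List.map_cons, List.map_map]
      simp [Function.comp_def]
    · rw [wins, dif_neg (by simp only [List.length_cons]; omega)]
      have h0 : (a :: t).length + 1 - k = 0 := by simp only [List.length_cons]; omega
      rw [h0]
      simp

theorem B_wins (l : List Int) (n : Int) (hn : 1 ≤ n) :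
    group_by_n_alt l n = wins l n.toNat := by
  unfold group_by_n_alt
  rw [PySem.List.pyRange_one, List.map_map, wins_eq_map n.toNat (by omega) l]
  have hlen : ((l.length : Int) - n + 1 - 0).toNat = l.length + 1 - n.toNat := by omega
  rw [hlen]
  apply List.map_congr_left
  intro k _
  show PySem.List.slice l (some ((0 : Int) + k)) (some ((0 : Int) + k + n)) = (l.drop k).take n.toNat
  have hcast : ((k : Int) + n) = ((k : Int) + (n.toNat : Int)) := by omega
  simp only [zero_add]
  rw [hcast, PySem.List.slice_natCast_add]

-- ===== VERDICT (by name: the statement is the Claim_ definition above) =====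
theorem group_by_n_spec : Claim_equal_group_by_n := by
  intro iterator n _ hpre
  unfold Spec_group_by_n group_by_n
  rw [A_wins n.toNat iterator, B_wins iterator n hpre]
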